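-- pv_equiv track=rewrite | github.com/Fightingkeyboard/CompSci | 11/mc.py | buildwordlist
-- ===== SOURCE A (Python) =====
-- def buildwordlist(text):
--     l = []
--     for w in text.split():
--         w = w.lower()
--         word = ''
--         for x in w:
--             if x.isalpha():
--                 word += x
--         if word != '':
--             l.append(word)
--     return l
-- ===== SOURCE B (Python) =====
-- def buildwordlist(text):
--     # Single pass over the characters: buffer letters (lowercased), flush on whitespace.
--     l = []
--     word = ''
--     for x in text:
--         if x.isspace():
--             if word != '':
--                 l.append(word)
--                 word = ''
--         elif x.isalpha():
--             word += x.lower()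
--     if word != '':
--         l.append(word)
--     return l
-- ===== Notes on version B (the rewrite author's own statement) =====
-- stated objective: alternative
-- what changed: B replaces A's split()-then-filter two-level loop by a single character-level pass that keeps a current-word buffer, lowercases letters as they arrive and flushes the buffer on whitespace.
import Mathlib
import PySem

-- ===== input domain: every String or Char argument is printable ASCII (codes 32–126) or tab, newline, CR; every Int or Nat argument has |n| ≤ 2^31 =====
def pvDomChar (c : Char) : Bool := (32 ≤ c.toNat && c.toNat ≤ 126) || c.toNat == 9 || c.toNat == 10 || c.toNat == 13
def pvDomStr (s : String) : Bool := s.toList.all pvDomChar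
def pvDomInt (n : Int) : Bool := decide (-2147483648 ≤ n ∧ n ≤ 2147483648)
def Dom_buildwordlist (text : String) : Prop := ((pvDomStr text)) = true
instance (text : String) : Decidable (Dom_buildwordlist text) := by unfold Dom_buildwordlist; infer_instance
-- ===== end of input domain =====

-- B is a single character-level pass with a current-word buffer (flushed on whitespace),
-- instead of A's text.split() followed by a per-word filtering loop; same cost, different structure.

-- ===== PORT A =====
def buildwordlist (text : String) : List String :=
  (PySem.Str.split₀ text).foldl
    (fun l w =>
      let w' := PySem.Str.lower w
      let word := w'.toList.foldl
        (fun (word : String) x => if PySem.Chars.isalpha x then word.push x else word) ""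
      if word ≠ "" then l ++ [word] else l)
    []

-- ===== PORT B =====
def buildwordlist_alt (text : String) : List String :=
  let r := text.toList.foldl
    (fun (s : List String × String) x =>
      if PySem.Chars.isspace x then
        (if s.2 ≠ "" then (s.1 ++ [s.2], "") else s)
      else if PySem.Chars.isalpha x then
        (s.1, s.2.push (PySem.Chars.lowerChar x))
      else s)
    ([], "")
  if r.2 ≠ "" then r.1 ++ [r.2] else r.1

-- ===== PRECONDITION & SPEC =====
def Spec_buildwordlist (text : String) (out : List String) : Prop := out = buildwordlist_alt text
instance (text : String) (out : List String) : Decidable (Spec_buildwordlist text out) := by unfold Spec_buildwordlist; infer_instance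

-- ===== CLAIM (what is proved, stated in full; the proofs are below) =====
def Claim_equal_buildwordlist : Prop := ∀ (text : String), Dom_buildwordlist text → Spec_buildwordlist text (buildwordlist text)

-- ===== LEMMAS AND PROOFS =====

-- char facts
theorem charDecide (a b : Char) : (decide (a ≤ b)) = decide (a.toNat ≤ b.toNat) := by
  simp only [decide_eq_decide, Char.le_def, Char.toNat]
  exact UInt32.le_iff_toNat_le

theorem ofNatToNat (n : Nat) (hv : n.isValidChar) : (Char.ofNat n).toNat = n := by
  unfold Char.ofNat; rw [dif_pos hv]; rfl

theorem alphaLower (c : Char) : PySem.Chars.isalpha (PySem.Chars.lowerChar c) = PySem.Chars.isalpha c := by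
  simp only [PySem.Chars.isalpha, PySem.Chars.lowerChar, PySem.Chars.isupper, PySem.Chars.islower, charDecide]
  by_cases hu : 65 ≤ c.toNat ∧ c.toNat ≤ 90
  · have hv : (c.toNat + 32).isValidChar := Or.inl (by omega)
    rw [if_pos (by simp; omega), ofNatToNat _ hv]
    rw [Bool.eq_iff_iff]; simp; omega
  · rw [if_neg (by simp; omega)]

theorem strNeEmpty (s : String) : (s ≠ "") ↔ s.toList ≠ [] := by
  constructor
  · intro h h2; exact h (String.toList_inj.mp (by simpa using h2))
  · intro h h2; exact h (by simp [h2])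

-- list-level versions of the two programs
def fw (w : List Char) : List Char := (PySem.Chars.lower w).filter PySem.Chars.isalpha

def emitW (ws : List (List Char)) : List (List Char) := (ws.map fw).filter (· ≠ [])

def stepL (s : List (List Char) × List Char) (x : Char) : List (List Char) × List Char :=
  if PySem.Chars.isspace x then
    (if s.2 ≠ [] then (s.1 ++ [s.2], []) else s)
  else if PySem.Chars.isalpha x then
    (s.1, s.2 ++ [PySem.Chars.lowerChar x])
  else s

def finL (s : List (List Char) × List Char) : List (List Char) :=
  if s.2 ≠ [] then s.1 ++ [s.2] else s.1

theorem fw_nil : fw [] = [] := rfl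

theorem fw_snoc (w : List Char) (c : Char) :
    fw (w ++ [c]) = fw w ++ (if PySem.Chars.isalpha c then [PySem.Chars.lowerChar c] else []) := by
  simp only [fw, PySem.Chars.lower, List.map_append, List.filter_append, List.map_cons,
    List.map_nil, List.filter_cons, List.filter_nil, alphaLower]

theorem emitW_append (a b : List (List Char)) : emitW (a ++ b) = emitW a ++ emitW b := by
  simp [emitW, List.filter_append]

-- split₀.go with a nonempty accumulator just prepends it
theorem go_acc (cs : List Char) : ∀ cur acc,
    PySem.Chars.split₀.go cs cur acc = acc.reverse ++ PySem.Chars.split₀.go cs cur [] := by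
  induction cs with
  | nil =>
    intro cur acc
    simp only [PySem.Chars.split₀.go]
    split_ifs <;> simp
  | cons c rest ih =>
    intro cur acc
    simp only [PySem.Chars.split₀.go]
    split_ifs with h1 h2
    · exact ih [] acc
    · rw [ih [] (cur.reverse :: acc), ih [] [cur.reverse]]; simp
    · exact ih (c :: cur) acc

-- the main invariant: B's scan, started with the letters of the current (reversed) token,
-- produces exactly the words A extracts from the remaining split
theorem mainInv (cs : List Char) : ∀ (rcur : List Char) (l : List (List Char)),
    finL (cs.foldl stepL (l, fw rcur.reverse)) = l ++ emitW (PySem.Chars.split₀.go cs rcur []) := by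
  induction cs with
  | nil =>
    intro rcur l
    simp only [List.foldl_nil, PySem.Chars.split₀.go]
    by_cases he : rcur = []
    · subst he; simp [finL, emitW, fw_nil]
    · rw [if_neg (by simp [he])]
      by_cases hf : fw rcur.reverse = [] <;> simp [finL, emitW, hf]
  | cons c rest ih =>
    intro rcur l
    rw [List.foldl_cons]
    by_cases hs : PySem.Chars.isspace c
    · by_cases he : rcur = []
      · subst he
        have hstep : stepL (l, fw (List.reverse ([] : List Char))) c
            = (l, fw (List.reverse ([] : List Char))) := by
          simp [stepL, hs, fw_nil]
        rw [hstep]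
        simp only [PySem.Chars.split₀.go, if_pos hs]
        rw [if_pos (by simp)]
        exact ih [] l
      · by_cases hf : fw rcur.reverse = []
        · have hstep : stepL (l, fw rcur.reverse) c = (l, fw (List.reverse ([] : List Char))) := by
            simp [stepL, hs, hf, fw_nil]
          rw [hstep]
          simp only [PySem.Chars.split₀.go, if_pos hs]
          rw [if_neg (by simp [he]), go_acc rest [] [rcur.reverse]]
          rw [ih [] l]
          have : emitW ([rcur.reverse].reverse ++ PySem.Chars.split₀.go rest [] [])
              = emitW (PySem.Chars.split₀.go rest [] []) := by
            rw [List.reverse_singleton, emitW_append]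
            simp [emitW, hf]
          rw [this]
        · have hstep : stepL (l, fw rcur.reverse) c
              = (l ++ [fw rcur.reverse], fw (List.reverse ([] : List Char))) := by
            simp [stepL, hs, hf, fw_nil]
          rw [hstep]
          simp only [PySem.Chars.split₀.go, if_pos hs]
          rw [if_neg (by simp [he]), go_acc rest [] [rcur.reverse]]
          rw [ih [] (l ++ [fw rcur.reverse])]
          rw [List.reverse_singleton, emitW_append]
          have : emitW [rcur.reverse] = [fw rcur.reverse] := by simp [emitW, hf]
          rw [this, List.append_assoc]
    · have hstep : stepL (l, fw rcur.reverse) c = (l, fw ((c :: rcur).reverse)) := by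
        simp only [stepL, if_neg hs, List.reverse_cons, fw_snoc]
        by_cases ha : PySem.Chars.isalpha c <;> simp [ha]
      rw [hstep]
      simp only [PySem.Chars.split₀.go, if_neg hs]
      exact ih (c :: rcur) l

-- A's inner fold (string level) computes the alpha filter
theorem innerFold (cs : List Char) : ∀ (acc : String),
    (cs.foldl (fun (word : String) x => if PySem.Chars.isalpha x then word.push x else word) acc).toList
      = acc.toList ++ cs.filter PySem.Chars.isalpha := by
  induction cs with
  | nil => intro acc; simp
  | cons c rest ih =>
    intro acc
    simp only [List.foldl_cons, List.filter_cons]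
    by_cases ha : PySem.Chars.isalpha c
    · simp [ha, ih]
    · simp [ha, ih]

-- A's port equals the list-level A (map String.ofList of emitW)
theorem portA_eq (text : String) :
    buildwordlist text = (emitW (PySem.Chars.split₀ text.toList)).map String.ofList := by
  unfold buildwordlist
  rw [PySem.Str.split₀]
  have key : ∀ (ws : List (List Char)) (l : List String) (lw : List (List Char)),
      l = lw.map String.ofList →
      (ws.map String.ofList).foldl
        (fun l w =>
          let w' := PySem.Str.lower w
          let word := w'.toList.foldl
            (fun (word : String) x => if PySem.Chars.isalpha x then word.push x else word) ""
          if word ≠ "" then l ++ [word] else l) l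
        = (lw ++ emitW ws).map String.ofList := by
    intro ws
    induction ws with
    | nil => intro l lw h; simp [emitW, h]
    | cons w rest ih =>
      intro l lw h
      simp only [List.map_cons, List.foldl_cons]
      have hw : (PySem.Str.lower (String.ofList w)).toList = PySem.Chars.lower w := by
        simp
      have hword : ((PySem.Str.lower (String.ofList w)).toList.foldl
          (fun (word : String) x => if PySem.Chars.isalpha x then word.push x else word) "").toList
          = fw w := by
        rw [innerFold, hw]; simp [fw]
      by_cases hf : fw w = []
      · rw [if_neg (by rw [strNeEmpty, hword]; simp [hf])]
        rw [ih l lw h]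
        have : emitW (w :: rest) = emitW rest := by simp [emitW, hf]
        rw [this]
      · have hword' : (PySem.Str.lower (String.ofList w)).toList.foldl
            (fun (word : String) x => if PySem.Chars.isalpha x then word.push x else word) ""
            = String.ofList (fw w) := String.toList_inj.mp (by rw [hword]; simp)
        rw [if_pos (by rw [strNeEmpty, hword]; exact hf)]
        rw [ih _ (lw ++ [fw w]) (by rw [h, hword']; simp)]
        have : emitW (w :: rest) = fw w :: emitW rest := by simp [emitW, hf]
        rw [this]
        simp
  rw [key (PySem.Chars.split₀ text.toList) [] [] (by simp)]
  simp

-- B's port equals the list-level B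
theorem portB_eq (text : String) :
    buildwordlist_alt text = (finL (text.toList.foldl stepL ([], []))).map String.ofList := by
  unfold buildwordlist_alt
  have key : ∀ (cs : List Char) (s : List String × String) (sl : List (List Char) × List Char),
      s.1 = sl.1.map String.ofList → s.2.toList = sl.2 →
      (cs.foldl
        (fun (s : List String × String) x =>
          if PySem.Chars.isspace x then
            (if s.2 ≠ "" then (s.1 ++ [s.2], "") else s)
          else if PySem.Chars.isalpha x then
            (s.1, s.2.push (PySem.Chars.lowerChar x))
          else s) s).1 = (cs.foldl stepL sl).1.map String.ofList ∧
      (cs.foldl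
        (fun (s : List String × String) x =>
          if PySem.Chars.isspace x then
            (if s.2 ≠ "" then (s.1 ++ [s.2], "") else s)
          else if PySem.Chars.isalpha x then
            (s.1, s.2.push (PySem.Chars.lowerChar x))
          else s) s).2.toList = (cs.foldl stepL sl).2 := by
    intro cs
    induction cs with
    | nil => intro s sl h1 h2; exact ⟨h1, h2⟩
    | cons c rest ih =>
      intro s sl h1 h2
      simp only [List.foldl_cons, stepL]
      by_cases hs : PySem.Chars.isspace c
      · rw [if_pos hs, if_pos hs]
        by_cases he : sl.2 = []
        · have hB : ¬ (s.2 ≠ "") := by rw [strNeEmpty, h2]; simp [he]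
          have hL : ¬ (sl.2 ≠ []) := by simp [he]
          rw [if_neg hB, if_neg hL]
          exact ih s sl h1 h2
        · have hB : s.2 ≠ "" := by rw [strNeEmpty, h2]; exact he
          have hL : sl.2 ≠ [] := he
          rw [if_pos hB, if_pos hL]
          refine ih _ _ ?_ ?_
          · simp [h1]
            exact String.toList_inj.mp (by simp [h2])
          · simp
      · rw [if_neg hs, if_neg hs]
        by_cases ha : PySem.Chars.isalpha c
        · rw [if_pos ha, if_pos ha]
          refine ih _ _ h1 ?_
          simp [h2]
        · rw [if_neg ha, if_neg ha]
          exact ih s sl h1 h2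
  obtain ⟨k1, k2⟩ := key text.toList ([], "") ([], []) (by simp) (by simp)
  simp only [finL]
  by_cases hf : (text.toList.foldl stepL ([], [])).2 = []
  · rw [if_neg (by rw [strNeEmpty, k2]; simp [hf]), if_neg (by simp [hf]), k1]
  · rw [if_pos (by rw [strNeEmpty, k2]; exact hf), if_pos (by simp [hf]), k1]
    rw [List.map_append]
    congr 1
    simp only [List.map_cons, List.map_nil]
    congr 1
    exact String.toList_inj.mp (by rw [k2]; simp)

-- ===== VERDICT (by name: the statement is the Claim_ definition above) =====
theorem buildwordlist_spec : Claim_equal_buildwordlist := by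
  intro text _
  unfold Spec_buildwordlist
  rw [portA_eq, portB_eq]
  have := mainInv text.toList [] []
  simp only [List.reverse_nil, fw_nil] at this
  rw [this]
  simp [PySem.Chars.split₀]
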